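-- pv_equiv track=rewrite | github.com/ab14jain/GrowTogether | Assignment Code/validQueries.py | validQueries
-- ===== SOURCE A (Python) =====
-- from typing import List
--
-- def validQueries(text : str, pattern : str, q : int, queries : List[List[int]]) -> int:
--     # code here
--
--     pattern_hash = {}
--
--     for i in pattern:
--         if i in pattern_hash:
--             pattern_hash[i] = pattern_hash[i] + 1
--         else:
--             pattern_hash[i] = 1
--
--     count = 0
--     for q in range(len(queries)):
--         l = queries[q][0]
--         r = queries[q][1]
--
--         temp_str_hash = {}
--         for i in range(len(text)):
--             if i < l or i > r:
--                 if text[i] in temp_str_hash: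
--                     temp_str_hash[text[i]] = temp_str_hash[text[i]] + 1
--                 else:
--                     temp_str_hash[text[i]] = 1
--
--         for k in pattern_hash:
--             if k in temp_str_hash:
--                 temp_str_hash[k] = temp_str_hash[k] - 1
--             else:
--                 temp_str_hash[k] = - 1
--
--         has_all_keys = True
--         keysList = list(temp_str_hash.keys())
--         if len(keysList) > 0:
--             for m in temp_str_hash:
--                 if temp_str_hash[m] < 0:
--                     has_all_keys = False
--                     break
--         else:
--             has_all_keys = False
--
--         if has_all_keys:
--             count += 1
--
--
--     return count
-- ===== SOURCE B (Python) =====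
-- from typing import List
--
-- def validQueries(text : str, pattern : str, q : int, queries : List[List[int]]) -> int:
--     n = len(text)
--     # distinct pattern characters, in first-occurrence order
--     chars = []
--     seen = set()
--     for c in pattern:
--         if c not in seen:
--             seen.add(c)
--             chars.append(c)
--     # prefix counts: pref[c][i] = occurrences of c in text[:i]
--     pref = {}
--     for c in chars:
--         acc = 0
--         row = [0]
--         for ch in text:
--             if ch == c:
--                 acc += 1
--             row.append(acc)
--         pref[c] = row
--     count = 0
--     for query in queries:
--         lo = min(max(query[0], 0), n)
--         hi = min(max(query[1] + 1, lo), n)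
--         if hi - lo < n and all(pref[c][n] - pref[c][hi] + pref[c][lo] >= 1 for c in chars):
--             count += 1
--     return count
-- ===== Notes on version B (the rewrite author's own statement) =====
-- stated objective: faster
-- what changed: B precomputes one prefix-count row per distinct pattern character and answers each query with four array lookups per character, instead of A's per-query rebuild of a character counter over the whole text.
-- outside the precondition, e.g. on validQueries('ab', 'a', 0, [[0]]): A raises IndexError, B raises IndexError
import Mathlib
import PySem

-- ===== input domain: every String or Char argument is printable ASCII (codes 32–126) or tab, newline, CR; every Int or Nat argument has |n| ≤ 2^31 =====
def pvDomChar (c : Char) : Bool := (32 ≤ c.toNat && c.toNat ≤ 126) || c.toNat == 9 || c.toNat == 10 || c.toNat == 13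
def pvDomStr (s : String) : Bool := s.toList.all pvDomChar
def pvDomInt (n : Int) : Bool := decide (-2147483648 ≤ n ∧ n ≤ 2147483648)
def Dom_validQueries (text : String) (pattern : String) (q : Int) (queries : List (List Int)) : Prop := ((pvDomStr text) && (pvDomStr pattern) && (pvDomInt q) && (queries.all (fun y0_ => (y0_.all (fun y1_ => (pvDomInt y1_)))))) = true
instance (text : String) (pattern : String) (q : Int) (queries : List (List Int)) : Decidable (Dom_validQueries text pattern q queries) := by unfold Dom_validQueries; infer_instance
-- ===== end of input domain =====

-- B replaces A's per-query rebuild of a character counter of the whole text (O(q·n)) by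
-- prefix-count rows per distinct pattern character, answering each query from four lookups.

-- ===== PORT A =====
-- A's 'for m in temp_str_hash: if temp[m] < 0: break' loop (early exit on a negative value)
def pvCheckNeg (d : PySem.Dict Char Int) : List Char → Bool
  | [] => true
  | m :: rest => if d.getD m 0 < 0 then false else pvCheckNeg d rest

-- A's body for one query: temp counter of text outside [l, r], decrement per pattern key, check
def pvQueryA (cs : List Char) (ph : PySem.Dict Char Int) (ql : List Int) : Bool :=
  let l := PySem.List.pyGetD ql 0 0
  let r := PySem.List.pyGetD ql 1 0
  let temp := (PySem.List.pyRange 0 (cs.length : Int) 1).foldl (fun d i =>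
      if i < l ∨ i > r then
        let c := PySem.List.pyGetD cs i ' '
        if d.contains c then d.insert c (d.getD c 0 + 1) else d.insert c 1
      else d) PySem.Dict.empty
  let temp2 := ph.keys.foldl (fun d k =>
      if d.contains k then d.insert k (d.getD k 0 - 1) else d.insert k (-1)) temp
  if temp2.keys.length > 0 then pvCheckNeg temp2 temp2.keys else false

def validQueries (text : String) (pattern : String) (q : Int) (queries : List (List Int)) : Int :=
  let ph := pattern.toList.foldl (fun d i =>
      if d.contains i then d.insert i (d.getD i 0 + 1) else d.insert i 1) PySem.Dict.empty
  (PySem.List.pyRange 0 (queries.length : Int) 1).foldl (fun count qi =>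
      let ql := PySem.List.pyGetD queries qi []
      if pvQueryA text.toList ph ql then count + 1 else count) 0

-- ===== PORT B =====
-- Source B's prefix row for character c: row[i] = occurrences of c in text[:i]
def pvRow (cs : List Char) (c : Char) : List Int :=
  (cs.foldl (fun (p : Int × List Int) ch =>
      let acc := if ch == c then p.1 + 1 else p.1
      (acc, p.2 ++ [acc])) (0, [0])).2

-- Source B's body for one query: clamp, then four prefix-row lookups per distinct pattern char
def pvQueryB (n : Int) (chars : List Char) (pref : PySem.Dict Char (List Int)) (ql : List Int) : Bool :=
  let lo := min (max (PySem.List.pyGetD ql 0 0) 0) n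
  let hi := min (max (PySem.List.pyGetD ql 1 0 + 1) lo) n
  decide (hi - lo < n) && chars.all (fun c =>
      let row := pref.getD c []
      decide (PySem.List.pyGetD row n 0 - PySem.List.pyGetD row hi 0 + PySem.List.pyGetD row lo 0 ≥ 1))

def validQueries_alt (text : String) (pattern : String) (q : Int) (queries : List (List Int)) : Int :=
  let cs := text.toList
  let n : Int := cs.length
  let chars : PySem.Set Char := PySem.Set.ofList pattern.toList
  let pref := chars.foldl (fun pr c => pr.insert c (pvRow cs c)) PySem.Dict.empty
  queries.foldl (fun count ql => if pvQueryB n chars pref ql then count + 1 else count) 0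

-- ===== PRECONDITION & SPEC =====
-- Pre_ excludes only queries with fewer than two entries, on which A (and B) raise IndexError.
def Pre_validQueries (text : String) (pattern : String) (q : Int) (queries : List (List Int)) : Prop :=
  ∀ ql ∈ queries, 2 ≤ ql.length
instance (text : String) (pattern : String) (q : Int) (queries : List (List Int)) : Decidable (Pre_validQueries text pattern q queries) := by unfold Pre_validQueries; infer_instance

def pvWitness_validQueries : String × String × Int × List (List Int) := ("abcab", "ab", 2, [[1, 2], [0, 4]])

def Spec_validQueries (text : String) (pattern : String) (q : Int) (queries : List (List Int)) (out : Int) : Prop := out = validQueries_alt text pattern q queries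
instance (text : String) (pattern : String) (q : Int) (queries : List (List Int)) (out : Int) : Decidable (Spec_validQueries text pattern q queries out) := by unfold Spec_validQueries; infer_instance

-- ===== CLAIM (what is proved, stated in full; the proofs are below) =====
def Claim_equal_validQueries : Prop := ∀ (text : String) (pattern : String) (q : Int) (queries : List (List Int)), Dom_validQueries text pattern q queries → Pre_validQueries text pattern q queries → Spec_validQueries text pattern q queries (validQueries text pattern q queries)

-- ===== LEMMAS AND PROOFS =====

-- the characters of cs outside the (raw, unclamped) window [l, r]
def pvOut (cs : List Char) (l r : Int) : List Char :=
  ((PySem.List.pyRange 0 (cs.length : Int) 1).filter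
      (fun i => decide (i < l) || decide (i > r))).map (fun i => PySem.List.pyGetD cs i ' ')

lemma pvCntBody (d : PySem.Dict Char Int) (c : Char) :
    (if d.contains c then d.insert c (d.getD c 0 + 1) else d.insert c 1) = d.insert c (d.getD c 0 + 1) := by
  by_cases h : d.contains c = true
  · simp [h]
  · simp only [Bool.not_eq_true] at h
    simp [h, PySem.Dict.getD_of_not_contains _ _ h]

lemma pvPh_eq (ps : List Char) :
    ps.foldl (fun d i => if d.contains i then d.insert i (d.getD i 0 + 1) else d.insert i 1)
      PySem.Dict.empty = PySem.Dict.counter ps := by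
  have : (fun (d : PySem.Dict Char Int) i => if d.contains i then d.insert i (d.getD i 0 + 1) else d.insert i 1)
      = fun d i => d.insert i (d.getD i 0 + 1) := by
    funext d i; exact pvCntBody d i
  rw [this, PySem.Dict.foldl_insert_getD_add_one_eq_counter]

lemma pvTemp_eq (cs : List Char) (l r : Int) :
    ((PySem.List.pyRange 0 (cs.length : Int) 1).foldl (fun d i =>
        if i < l ∨ i > r then
          let c := PySem.List.pyGetD cs i ' '
          if d.contains c then d.insert c (d.getD c 0 + 1) else d.insert c 1
        else d) PySem.Dict.empty) = PySem.Dict.counter (pvOut cs l r) := by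
  rw [← PySem.Dict.foldl_insert_getD_add_one_eq_counter]
  unfold pvOut
  rw [List.foldl_map, List.foldl_filter]
  apply PySem.List.foldl_congr_mem
  intro d i _
  by_cases h : i < l ∨ i > r
  · simp only [h, if_true]
    have hb : (decide (i < l) || decide (i > r)) = true := by
      rcases h with h | h <;> simp [h]
    rw [hb, if_pos rfl, pvCntBody]
  · have hb : (decide (i < l) || decide (i > r)) = false := by
      simp only [Bool.or_eq_false_iff, decide_eq_false_iff_not]
      omega
    simp [h, hb]

lemma pvDecBody (d : PySem.Dict Char Int) (k : Char) :
    (if d.contains k then d.insert k (d.getD k 0 - 1) else d.insert k (-1)) = d.insert k (d.getD k 0 - 1) := by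
  by_cases h : d.contains k = true
  · simp [h]
  · simp only [Bool.not_eq_true] at h
    simp [h, PySem.Dict.getD_of_not_contains _ _ h]

lemma pvDec_getD (ks : List Char) (hnd : ks.Nodup) (d : PySem.Dict Char Int) (c : Char) :
    (ks.foldl (fun d k => d.insert k (d.getD k 0 - 1)) d).getD c 0
      = d.getD c 0 - (if c ∈ ks then 1 else 0) := by
  induction ks generalizing d with
  | nil => simp
  | cons k ks ih =>
    simp only [List.foldl_cons]
    rw [ih (List.Nodup.of_cons hnd)]
    rw [PySem.Dict.getD_insert]
    rcases List.nodup_cons.mp hnd with ⟨hk, _⟩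
    by_cases hc : c = k
    · subst hc; simp [hk]
    · simp [hc, List.mem_cons]

lemma pvCheckNeg_eq (d : PySem.Dict Char Int) (ks : List Char) :
    pvCheckNeg d ks = ks.all (fun m => !decide (d.getD m 0 < 0)) := by
  induction ks with
  | nil => rfl
  | cons m rest ih =>
    by_cases h : d.getD m 0 < 0
    · simp [pvCheckNeg, h]
    · simp [pvCheckNeg, h, ih]

lemma pvRowAux (cs : List Char) (c : Char) :
    cs.foldl (fun (p : Int × List Int) ch =>
        let acc := if ch == c then p.1 + 1 else p.1
        (acc, p.2 ++ [acc])) (0, [0])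
      = ((cs.count c : Int), (List.range (cs.length + 1)).map (fun j => ((cs.take j).count c : Int))) := by
  induction cs using List.reverseRecOn with
  | nil => simp
  | append_singleton ds ch ih =>
    rw [List.foldl_append, ih]
    have hcnt : ((ds ++ [ch]).count c : Int) = if ch == c then (ds.count c : Int) + 1 else (ds.count c : Int) := by
      rw [List.count_append]
      by_cases h : ch == c
      · simp [List.count_singleton, h]
      · simp only [List.count_singleton]
        simp only [beq_iff_eq] at h ⊢
        have : ¬ (c = ch) := fun he => h he.symm
        simp [h]
    rw [List.foldl_cons, List.foldl_nil]
    show ((if (ch == c) then ((ds.count c : Int)) + 1 else ((ds.count c : Int))),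
        (List.range (ds.length + 1)).map (fun j => ((ds.take j).count c : Int))
          ++ [if (ch == c) then ((ds.count c : Int)) + 1 else ((ds.count c : Int))]) = _
    have hlen : (ds ++ [ch]).length + 1 = (ds.length + 1) + 1 := by simp
    rw [Prod.mk.injEq]
    refine ⟨hcnt.symm, ?_⟩
    rw [hlen]
    conv_rhs => rw [List.range_succ, List.map_append]
    congr 1
    · apply List.map_congr_left
      intro j hj
      have hj' : j ≤ ds.length := by
        have := List.mem_range.mp hj; omega
      rw [List.take_append_of_le_length hj']
    · rw [List.map_singleton]
      have htk : (ds ++ [ch]).take (ds.length + 1) = ds ++ [ch] := by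
        apply List.take_of_length_le; simp
      rw [htk, hcnt]

lemma pvRow_eq (cs : List Char) (c : Char) :
    pvRow cs c = (List.range (cs.length + 1)).map (fun j => ((cs.take j).count c : Int)) := by
  unfold pvRow
  rw [pvRowAux]

lemma pvPref_getD (ks : List Char) (hnd : ks.Nodup) (g : Char → List Int)
    (d : PySem.Dict Char (List Int)) (c : Char) :
    (ks.foldl (fun pr k => pr.insert k (g k)) d).getD c []
      = if c ∈ ks then g c else d.getD c [] := by
  induction ks generalizing d with
  | nil => simp
  | cons k ks ih =>
    simp only [List.foldl_cons]
    rw [ih (List.Nodup.of_cons hnd)]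
    rw [PySem.Dict.getD_insert]
    rcases List.nodup_cons.mp hnd with ⟨hk, _⟩
    by_cases hc : c = k
    · subst hc; simp [hk]
    · simp [hc, List.mem_cons]

lemma pvRow_getD (cs : List Char) (c : Char) (j : Int) (h0 : 0 ≤ j) (h1 : j ≤ (cs.length : Int)) :
    PySem.List.pyGetD (pvRow cs c) j 0 = ((cs.take j.toNat).count c : Int) := by
  rw [pvRow_eq]
  have hlen : ((List.range (cs.length + 1)).map (fun j => ((cs.take j).count c : Int))).length
      = cs.length + 1 := by simp
  have hj : j < (((List.range (cs.length + 1)).map (fun j => ((cs.take j).count c : Int))).length : Int) := by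
    rw [hlen]; push_cast; omega
  rw [PySem.List.pyGetD_eq_getElem _ _ h0 hj]
  simp [List.getElem_map, List.getElem_range]

lemma pvMapTake (cs : List Char) (b : Int) (h0 : 0 ≤ b) (h1 : b ≤ (cs.length : Int)) :
    (PySem.List.pyRange 0 b 1).map (fun i => PySem.List.pyGetD cs i ' ') = cs.take b.toNat := by
  have hbl : (cs.take b.toNat).length = b.toNat := by
    rw [List.length_take]; omega
  have h2 := PySem.List.map_pyGetD_pyRange_zero' (cs.take b.toNat) ' '
  rw [hbl] at h2
  have hb : b = ((b.toNat : Nat) : Int) := by omega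
  conv_lhs => rw [hb]
  rw [← h2]
  apply List.map_congr_left
  intro i hi
  rcases PySem.List.mem_pyRange_one.mp hi with ⟨hi0, hi1⟩
  have hilen : i < ((cs.take b.toNat).length : Int) := by rw [hbl]; omega
  have hilen2 : i < (cs.length : Int) := by push_cast at hilen ⊢; omega
  rw [PySem.List.pyGetD_eq_getElem _ _ hi0 hilen2, PySem.List.pyGetD_eq_getElem _ _ hi0 hilen]
  rw [List.getElem_take]

lemma pvOut_decomp (cs : List Char) (l r : Int) :
    pvOut cs l r
      = cs.take (min (max l 0) (cs.length : Int)).toNat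
        ++ cs.drop (min (max (r + 1) (min (max l 0) (cs.length : Int))) (cs.length : Int)).toNat := by
  have hn : (0 : Int) ≤ (cs.length : Int) := by positivity
  set n := (cs.length : Int) with hndef
  set lo := min (max l 0) n with hlo
  set hi := min (max (r + 1) lo) n with hhi
  have h1 : 0 ≤ lo := by omega
  have h2 : lo ≤ hi := by omega
  have h3 : hi ≤ n := by omega
  have hsplit : PySem.List.pyRange 0 n 1
      = PySem.List.pyRange 0 lo 1 ++ PySem.List.pyRange lo hi 1 ++ PySem.List.pyRange hi n 1 := by
    rw [PySem.List.pyRange_one_append 0 hi n (by omega) (by omega),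
        PySem.List.pyRange_one_append 0 lo hi (by omega) (by omega)]
  unfold pvOut
  rw [← hndef, hsplit, List.filter_append, List.filter_append]
  have hf1 : (PySem.List.pyRange 0 lo 1).filter (fun i => decide (i < l) || decide (i > r))
      = PySem.List.pyRange 0 lo 1 := by
    apply List.filter_eq_self.mpr
    intro i hi'
    rcases PySem.List.mem_pyRange_one.mp hi' with ⟨hi0, hi1⟩
    have : i < l := by omega
    simp [this]
  have hf2 : (PySem.List.pyRange lo hi 1).filter (fun i => decide (i < l) || decide (i > r))
      = [] := by
    apply List.filter_eq_nil_iff.mpr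
    intro i hi'
    rcases PySem.List.mem_pyRange_one.mp hi' with ⟨hi0, hi1⟩
    have hl : ¬ i < l := by omega
    have hr : ¬ i > r := by omega
    simp [hl, hr]
  have hf3 : (PySem.List.pyRange hi n 1).filter (fun i => decide (i < l) || decide (i > r))
      = PySem.List.pyRange hi n 1 := by
    apply List.filter_eq_self.mpr
    intro i hi'
    rcases PySem.List.mem_pyRange_one.mp hi' with ⟨hi0, hi1⟩
    have : i > r := by omega
    simp [this]
  rw [hf1, hf2, hf3, List.append_nil, List.map_append]
  rw [pvMapTake cs lo h1 (by omega)]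
  rw [hndef] at h3 ⊢
  rw [PySem.List.map_pyGetD_pyRange' cs ' ' (by omega)]

lemma pvOut_count (cs : List Char) (l r : Int) (c : Char) :
    ((pvOut cs l r).count c : Int)
      = ((cs.take (min (max l 0) (cs.length : Int)).toNat).count c : Int)
        + ((cs.drop (min (max (r + 1) (min (max l 0) (cs.length : Int))) (cs.length : Int)).toNat).count c : Int) := by
  rw [pvOut_decomp, List.count_append]
  push_cast
  ring

lemma pvOut_length (cs : List Char) (l r : Int) :
    ((pvOut cs l r).length : Int)
      = min (max l 0) (cs.length : Int)
        + ((cs.length : Int) - min (max (r + 1) (min (max l 0) (cs.length : Int))) (cs.length : Int)) := by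
  rw [pvOut_decomp, List.length_append, List.length_take, List.length_drop]
  push_cast
  omega

lemma pvQuery_eq (cs ps : List Char) (ql : List Int) :
    pvQueryA cs (PySem.Dict.counter ps) ql
      = pvQueryB (cs.length : Int) (PySem.Set.ofList ps)
          ((PySem.Set.ofList ps).foldl (fun pr c => pr.insert c (pvRow cs c)) PySem.Dict.empty) ql := by
  simp only [pvQueryA, pvQueryB]
  rw [pvTemp_eq]
  have hfun : (fun (d : PySem.Dict Char Int) k =>
      if d.contains k then d.insert k (d.getD k 0 - 1) else d.insert k (-1))
      = fun (d : PySem.Dict Char Int) k => d.insert k (d.getD k 0 - 1) := by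
    funext d k; exact pvDecBody d k
  rw [hfun, PySem.Dict.keys_counter]
  set l := PySem.List.pyGetD ql 0 0 with hldef
  set r := PySem.List.pyGetD ql 1 0 with hrdef
  have hn : (0 : Int) ≤ (cs.length : Int) := by positivity
  set n := (cs.length : Int) with hndef
  set lo := min (max l 0) n with hlodef
  set hi := min (max (r + 1) lo) n with hhidef
  have h1 : 0 ≤ lo := by omega
  have h2 : lo ≤ hi := by omega
  have h3 : hi ≤ n := by omega
  set out := pvOut cs l r with houtdef
  set temp2 := (PySem.Set.ofList ps).foldl
      (fun (d : PySem.Dict Char Int) k => d.insert k (d.getD k 0 - 1))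
      (PySem.Dict.counter out) with htemp2
  -- lookups in temp2
  have hget : ∀ c, temp2.getD c 0
      = (out.count c : Int) - (if c ∈ PySem.Set.ofList ps then 1 else 0) := by
    intro c
    rw [htemp2, pvDec_getD _ (PySem.Set.nodup_ofList ps), PySem.Dict.getD_counter]
  have hkeys : temp2.keys = PySem.Set.update (PySem.Set.ofList out) (PySem.Set.ofList ps) := by
    rw [htemp2, PySem.Dict.keys_foldl_insert, PySem.Dict.keys_counter]
  -- the length of the outside part
  have hlen : (out.length : Int) = lo + (n - hi) := by
    rw [houtdef]; exact pvOut_length cs l r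
  -- B's per-character test computes the outside count
  have hB : ∀ c ∈ PySem.Set.ofList ps,
      (PySem.List.pyGetD ((((PySem.Set.ofList ps).foldl
            (fun pr c => pr.insert c (pvRow cs c)) PySem.Dict.empty)).getD c []) n 0
        - PySem.List.pyGetD ((((PySem.Set.ofList ps).foldl
            (fun pr c => pr.insert c (pvRow cs c)) PySem.Dict.empty)).getD c []) hi 0
        + PySem.List.pyGetD ((((PySem.Set.ofList ps).foldl
            (fun pr c => pr.insert c (pvRow cs c)) PySem.Dict.empty)).getD c []) lo 0)
      = (out.count c : Int) := by
    intro c hc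
    rw [pvPref_getD _ (PySem.Set.nodup_ofList ps), if_pos hc]
    rw [pvRow_getD cs c n hn (by omega), pvRow_getD cs c hi (by omega) (by omega),
        pvRow_getD cs c lo (by omega) (by omega)]
    have htake : cs.take n.toNat = cs := by
      apply List.take_of_length_le; omega
    rw [htake, houtdef, pvOut_count cs l r]
    have hsplit := List.take_append_drop hi.toNat cs
    have : cs.count c = (cs.take hi.toNat).count c + (cs.drop hi.toNat).count c := by
      conv_lhs => rw [← hsplit]
      rw [List.count_append]
    rw [← hlodef, ← hhidef, this]
    push_cast
    ring
  -- now compare the two Booleans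
  apply Bool.coe_iff_coe.mp
  rw [pvCheckNeg_eq]
  constructor
  · intro hA
    by_cases hne : temp2.keys.length > 0
    swap
    · rw [if_neg hne] at hA; exact absurd hA (by simp)
    rw [if_pos hne] at hA
    simp only [List.all_eq_true, Bool.not_eq_eq_eq_not, Bool.not_true, decide_eq_false_iff_not,
      not_lt] at hA
    have hps : ∀ c ∈ PySem.Set.ofList ps, 1 ≤ (out.count c : Int) := by
      intro c hc
      have hmem : c ∈ temp2.keys := by
        rw [hkeys]; exact (PySem.Set.mem_update _ _ _).mpr (Or.inr hc)
      have := hA c hmem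
      rw [hget c, if_pos hc] at this
      omega
    have hout : out ≠ [] := by
      rcases List.exists_mem_of_ne_nil temp2.keys (by intro h; rw [h] at hne; simp at hne) with ⟨m, hm⟩
      rw [hkeys] at hm
      rcases (PySem.Set.mem_update _ _ _).mp hm with hm | hm
      · intro h
        rw [h] at hm
        simp at hm
      · intro h
        have := hps m hm
        rw [h] at this
        simp at this
    have houtlen : 0 < (out.length : Int) := by
      have : out.length ≠ 0 := fun h => hout (List.eq_nil_of_length_eq_zero h)
      omega
    simp only [Bool.and_eq_true, decide_eq_true_eq, List.all_eq_true]
    refine ⟨by omega, ?_⟩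
    intro c hc
    rw [hB c hc]
    simp only [ge_iff_le]
    exact hps c hc
  · intro hBside
    simp only [Bool.and_eq_true, decide_eq_true_eq, List.all_eq_true] at hBside
    obtain ⟨hlt, hall⟩ := hBside
    have hps : ∀ c ∈ PySem.Set.ofList ps, 1 ≤ (out.count c : Int) := by
      intro c hc
      have := hall c hc
      rw [hB c hc] at this
      simpa using this
    have hne : temp2.keys.length > 0 := by
      have houtne : out ≠ [] := by
        intro h
        have : (out.length : Int) = 0 := by rw [h]; simp
        omega
      rcases List.exists_mem_of_ne_nil out houtne with ⟨x, hx⟩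
      have : x ∈ temp2.keys := by
        rw [hkeys]
        exact (PySem.Set.mem_update _ _ _).mpr (Or.inl ((PySem.Set.mem_ofList _ _).mpr hx))
      exact List.length_pos_of_mem this
    rw [if_pos hne]
    simp only [List.all_eq_true, Bool.not_eq_eq_eq_not, Bool.not_true, decide_eq_false_iff_not,
      not_lt]
    intro m hm
    rw [hget m]
    by_cases hmp : m ∈ PySem.Set.ofList ps
    · rw [if_pos hmp]
      have := hps m hmp
      omega
    · rw [if_neg hmp]
      have : (0 : Int) ≤ (out.count m : Int) := by positivity
      omega

-- ===== VERDICT (by name: the statement is the Claim_ definition above) =====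
theorem validQueries_spec : Claim_equal_validQueries := by
  intro text pattern q queries _ _
  unfold Spec_validQueries
  simp only [validQueries, validQueries_alt]
  rw [pvPh_eq]
  rw [PySem.List.foldl_pyRange_zero_pyGetD' queries ([] : List Int)
      (fun count ql => if pvQueryA text.toList (PySem.Dict.counter pattern.toList) ql then count + 1 else count) 0]
  apply PySem.List.foldl_congr_mem
  intro acc ql _
  rw [pvQuery_eq]
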